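-- pv_equiv track=rewrite | github.com/nghiaphan31/albert-agile | config/litellm_hooks.py | _get_routing_path
-- ===== SOURCE A (Python) =====
-- from collections import deque
-- from typing import AsyncGenerator, Any, List, Tuple
--
-- FALLBACK_CHAINS = {
--     "architect-free-gemini-2.5-pro": ["architect-vertex-gemini-2.5-pro", "architect-pay-deepseek-chat"],
--     "architect-vertex-gemini-2.5-pro": ["architect-pay-deepseek-chat"],
--     "ingest-free-gemini-2.5-flash": ["ingest-vertex-gemini-2.0-flash", "ingest-pay-gemini-2.5-flash"],
--     "ingest-vertex-gemini-2.0-flash": ["ingest-pay-gemini-2.5-flash"],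
--     "qwen3": ["worker-free-gemini-2.5-flash", "worker-pay-deepseek-chat"],
--     "worker-local-qwen2.5-coder:14b": ["worker-free-gemini-2.5-flash", "worker-pay-deepseek-chat"],
--     "worker-free-gemini-2.5-flash": ["worker-pay-deepseek-chat"],
--     "langgraph-conception-qwen2.5:14b": ["fallback-gemini-2.5-flash", "fallback-claude-opus-4-6"],
--     "langgraph-code-qwen2.5-coder:14b": ["fallback-gemini-2.5-flash", "fallback-claude-sonnet-4-6"],
--     "fallback-gemini-2.5-flash": ["fallback-claude-sonnet-4-6", "local-qwen3:14b"],
--     "local-qwen3:14b": ["fallback-gemini-2.5-flash", "fallback-claude-sonnet-4-6"],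
--     "local-qwen2.5-coder:14b": ["fallback-gemini-2.5-flash", "fallback-claude-sonnet-4-6"],
--     "local-qwen2.5:14b": ["fallback-gemini-2.5-flash", "fallback-claude-sonnet-4-6"],
-- }
--
-- def _get_routing_path(routed: str, actual: str) -> List[Tuple[str, bool]]:
--     """
--     Reconstruit le chemin de routage (modèles demandés puis échoués → modèle qui a répondu).
--     BFS sur FALLBACK_CHAINS. Si actual hors chaîne (ex. provider ID normalisé), on l'ajoute à la fin.
--     """
--     if not routed and not actual:
--         return []
--     routed = (routed or "").strip()
--     actual = (actual or routed).strip()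
--     if routed == actual:
--         return [(routed, True)]  # pas de fallback
--     if not routed:
--         return [(actual, True)]
--     if not actual:
--         return [(routed, False)]
--
--     # BFS : routed → ... → actual
--     parent = {routed: None}
--     queue = deque([routed])
--     found = False
--     while queue:
--         cur = queue.popleft()
--         for fb in FALLBACK_CHAINS.get(cur, []):
--             if fb not in parent:
--                 parent[fb] = cur
--                 if fb == actual:
--                     found = True
--                     break
--                 queue.append(fb)
--         if found:
--             break
--
--     if found:
--         path_models = []
--         node = actual
--         while node is not None:
--             path_models.insert(0, node)
--             node = parent.get(node)
--         return [(m, m == actual) for m in path_models]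
--
--     # actual hors chaîne (ex. fallback-gemini quand worker-free a répondu)
--     return [(routed, False), (actual, True)]
-- ===== SOURCE B (Python) =====
-- from collections import deque
--
-- FALLBACK_CHAINS = {
--     "architect-free-gemini-2.5-pro": ["architect-vertex-gemini-2.5-pro", "architect-pay-deepseek-chat"],
--     "architect-vertex-gemini-2.5-pro": ["architect-pay-deepseek-chat"],
--     "ingest-free-gemini-2.5-flash": ["ingest-vertex-gemini-2.0-flash", "ingest-pay-gemini-2.5-flash"],
--     "ingest-vertex-gemini-2.0-flash": ["ingest-pay-gemini-2.5-flash"],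
--     "qwen3": ["worker-free-gemini-2.5-flash", "worker-pay-deepseek-chat"],
--     "worker-local-qwen2.5-coder:14b": ["worker-free-gemini-2.5-flash", "worker-pay-deepseek-chat"],
--     "worker-free-gemini-2.5-flash": ["worker-pay-deepseek-chat"],
--     "langgraph-conception-qwen2.5:14b": ["fallback-gemini-2.5-flash", "fallback-claude-opus-4-6"],
--     "langgraph-code-qwen2.5-coder:14b": ["fallback-gemini-2.5-flash", "fallback-claude-sonnet-4-6"],
--     "fallback-gemini-2.5-flash": ["fallback-claude-sonnet-4-6", "local-qwen3:14b"],
--     "local-qwen3:14b": ["fallback-gemini-2.5-flash", "fallback-claude-sonnet-4-6"],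
--     "local-qwen2.5-coder:14b": ["fallback-gemini-2.5-flash", "fallback-claude-sonnet-4-6"],
--     "local-qwen2.5:14b": ["fallback-gemini-2.5-flash", "fallback-claude-sonnet-4-6"],
-- }
--
--
-- def _get_routing_path(routed, actual):
--     """Path-carrying BFS: the queue holds (node, path-so-far) pairs and a visited
--     set replaces the parent dict, so no backward reconstruction is needed."""
--     if not routed and not actual:
--         return []
--     routed = (routed or "").strip()
--     actual = (actual or routed).strip()
--     if routed == actual:
--         return [(routed, True)]
--     if not routed:
--         return [(actual, True)]
--     if not actual:
--         return [(routed, False)]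
--
--     visited = {routed}
--     queue = deque([(routed, [routed])])
--     while queue:
--         node, path = queue.popleft()
--         for fb in FALLBACK_CHAINS.get(node, []):
--             if fb in visited:
--                 continue
--             if fb == actual:
--                 return [(m, m == actual) for m in path + [fb]]
--             visited.add(fb)
--             queue.append((fb, path + [fb]))
--     return [(routed, False), (actual, True)]
-- ===== Notes on version B (the rewrite author's own statement) =====
-- stated objective: alternative
-- what changed: The parent-pointer BFS with a backward path-reconstruction walk is replaced by a path-carrying BFS: the queue holds (node, path) pairs and a visited set replaces the parent dict, so the found path is returned directly with no reconstruction loop.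
import Mathlib
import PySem

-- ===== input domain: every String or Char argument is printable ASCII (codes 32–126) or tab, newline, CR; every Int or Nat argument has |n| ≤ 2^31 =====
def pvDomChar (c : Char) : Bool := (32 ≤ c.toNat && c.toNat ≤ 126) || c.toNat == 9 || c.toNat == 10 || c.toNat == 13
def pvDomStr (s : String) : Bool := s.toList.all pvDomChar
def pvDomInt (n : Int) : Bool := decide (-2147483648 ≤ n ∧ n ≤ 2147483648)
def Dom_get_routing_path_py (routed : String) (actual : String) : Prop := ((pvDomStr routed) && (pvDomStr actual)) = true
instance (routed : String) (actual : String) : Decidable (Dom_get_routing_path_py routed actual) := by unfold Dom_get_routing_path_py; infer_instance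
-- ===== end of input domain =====

-- B replaces A's parent-dict BFS + backward reconstruction by a path-carrying BFS with a
-- visited set (same traversal order, result returned directly); alternative decomposition, not faster.


-- ===== PORT A =====
-- FALLBACK_CHAINS, the module-level dict (keys are distinct, so the literal list is the dict's items)
def pvChains : PySem.Dict String (List String) := PySem.Dict.mk [
  ("architect-free-gemini-2.5-pro", ["architect-vertex-gemini-2.5-pro", "architect-pay-deepseek-chat"]),
  ("architect-vertex-gemini-2.5-pro", ["architect-pay-deepseek-chat"]),
  ("ingest-free-gemini-2.5-flash", ["ingest-vertex-gemini-2.0-flash", "ingest-pay-gemini-2.5-flash"]),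
  ("ingest-vertex-gemini-2.0-flash", ["ingest-pay-gemini-2.5-flash"]),
  ("qwen3", ["worker-free-gemini-2.5-flash", "worker-pay-deepseek-chat"]),
  ("worker-local-qwen2.5-coder:14b", ["worker-free-gemini-2.5-flash", "worker-pay-deepseek-chat"]),
  ("worker-free-gemini-2.5-flash", ["worker-pay-deepseek-chat"]),
  ("langgraph-conception-qwen2.5:14b", ["fallback-gemini-2.5-flash", "fallback-claude-opus-4-6"]),
  ("langgraph-code-qwen2.5-coder:14b", ["fallback-gemini-2.5-flash", "fallback-claude-sonnet-4-6"]),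
  ("fallback-gemini-2.5-flash", ["fallback-claude-sonnet-4-6", "local-qwen3:14b"]),
  ("local-qwen3:14b", ["fallback-gemini-2.5-flash", "fallback-claude-sonnet-4-6"]),
  ("local-qwen2.5-coder:14b", ["fallback-gemini-2.5-flash", "fallback-claude-sonnet-4-6"]),
  ("local-qwen2.5:14b", ["fallback-gemini-2.5-flash", "fallback-claude-sonnet-4-6"])]

-- A's inner 'for fb in FALLBACK_CHAINS.get(cur, [])' loop (break on fb == actual → found=True)
def pvAInner (chain : List String) (cur actual : String)
    (parent : PySem.Dict String (Option String)) (queue : List String) :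
    PySem.Dict String (Option String) × List String × Bool :=
  match chain with
  | [] => (parent, queue, false)
  | fb :: rest =>
    if PySem.Dict.contains parent fb then pvAInner rest cur actual parent queue
    else
      let parent' := PySem.Dict.insert parent fb (some cur)
      if fb == actual then (parent', queue, true)
      else pvAInner rest cur actual parent' (queue ++ [fb])

-- A's 'while queue' BFS loop; fuel bounds the iterations (the pops are bounded by the fixed graph)
def pvALoop : Nat → List String → PySem.Dict String (Option String) → String →
    PySem.Dict String (Option String) × Bool
  | 0, _, parent, _ => (parent, false)
  | _ + 1, [], parent, _ => (parent, false)
  | fuel + 1, cur :: queue, parent, actual =>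
    let p := pvAInner (PySem.Dict.getD pvChains cur []) cur actual parent queue
    if p.2.2 then (p.1, true) else pvALoop fuel p.2.1 p.1 actual

-- A's backward reconstruction 'while node is not None: path_models.insert(0, node); node = parent.get(node)'
def pvARecon : Nat → Option String → PySem.Dict String (Option String) → List String → List String
  | 0, _, _, acc => acc
  | _ + 1, none, _, acc => acc
  | fuel + 1, some node, parent, acc =>
    pvARecon fuel (Option.join (PySem.Dict.get? parent node)) parent (node :: acc)

def get_routing_path_py (routed : String) (actual : String) : List (String × Bool) :=
  if routed = "" ∧ actual = "" then []
  else
    let r := PySem.Str.strip routed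
    let a := PySem.Str.strip (if actual = "" then r else actual)
    if r = a then [(r, true)]
    else if r = "" then [(a, true)]
    else if a = "" then [(r, false)]
    else
      let p := pvALoop 32 [r] (PySem.Dict.insert PySem.Dict.empty r none) a
      if p.2 then (pvARecon 32 (some a) p.1 []).map (fun m => (m, m == a))
      else [(r, false), (a, true)]

-- ===== PORT B =====
-- B's inner for loop: early-return (some result) on fb == actual, else extend visited/queue
def pvBInner (chain : List String) (path : List String) (actual : String)
    (visited : PySem.Set String) (queue : List (String × List String)) :
    Option (List (String × Bool)) × PySem.Set String × List (String × List String) :=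
  match chain with
  | [] => (none, visited, queue)
  | fb :: rest =>
    if PySem.Set.contains visited fb then pvBInner rest path actual visited queue
    else if fb == actual then
      (some ((path ++ [fb]).map (fun m => (m, m == actual))), visited, queue)
    else pvBInner rest path actual (PySem.Set.add visited fb) (queue ++ [(fb, path ++ [fb])])

-- B's 'while queue' loop over (node, path) pairs
def pvBLoop : Nat → List (String × List String) → PySem.Set String → String → String →
    List (String × Bool)
  | 0, _, _, routed, actual => [(routed, false), (actual, true)]
  | _ + 1, [], _, routed, actual => [(routed, false), (actual, true)]
  | fuel + 1, (node, path) :: queue, visited, routed, actual =>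
    match pvBInner (PySem.Dict.getD pvChains node []) path actual visited queue with
    | (some res, _, _) => res
    | (none, visited', queue') => pvBLoop fuel queue' visited' routed actual

def get_routing_path_py_alt (routed : String) (actual : String) : List (String × Bool) :=
  if routed = "" ∧ actual = "" then []
  else
    let r := PySem.Str.strip routed
    let a := PySem.Str.strip (if actual = "" then r else actual)
    if r = a then [(r, true)]
    else if r = "" then [(a, true)]
    else if a = "" then [(r, false)]
    else pvBLoop 32 [(r, [r])] (PySem.Set.add PySem.Set.empty r) r a

-- ===== PRECONDITION & SPEC =====
def Spec_get_routing_path_py (routed : String) (actual : String) (out : List (String × Bool)) : Prop := out = get_routing_path_py_alt routed actual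
instance (routed : String) (actual : String) (out : List (String × Bool)) : Decidable (Spec_get_routing_path_py routed actual out) := by unfold Spec_get_routing_path_py; infer_instance

-- ===== CLAIM (what is proved, stated in full; the proofs are below) =====
def Claim_equal_get_routing_path_py : Prop := ∀ (routed : String) (actual : String), Dom_get_routing_path_py routed actual → Spec_get_routing_path_py routed actual (get_routing_path_py routed actual)

-- ===== LEMMAS AND PROOFS =====
def pvKeys : List String :=
  ["architect-free-gemini-2.5-pro", "architect-vertex-gemini-2.5-pro",
   "ingest-free-gemini-2.5-flash", "ingest-vertex-gemini-2.0-flash", "qwen3",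
   "worker-local-qwen2.5-coder:14b", "worker-free-gemini-2.5-flash",
   "langgraph-conception-qwen2.5:14b", "langgraph-code-qwen2.5-coder:14b",
   "fallback-gemini-2.5-flash", "local-qwen3:14b", "local-qwen2.5-coder:14b",
   "local-qwen2.5:14b"]

def pvVals : List String :=
  ["architect-vertex-gemini-2.5-pro", "architect-pay-deepseek-chat",
   "ingest-vertex-gemini-2.0-flash", "ingest-pay-gemini-2.5-flash",
   "worker-free-gemini-2.5-flash", "worker-pay-deepseek-chat",
   "fallback-gemini-2.5-flash", "fallback-claude-opus-4-6",
   "fallback-claude-sonnet-4-6", "local-qwen3:14b"]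

-- every neighbour produced by FALLBACK_CHAINS.get(cur, []) lies in pvVals
theorem pvChain_sub (cur x : String) (hx : x ∈ PySem.Dict.getD pvChains cur []) : x ∈ pvVals := by
  rw [PySem.Dict.getD_eq_get?_getD] at hx
  cases h : PySem.Dict.get? pvChains cur with
  | none => rw [h] at hx; simp at hx
  | some v =>
    rw [h] at hx
    simp only [Option.getD_some] at hx
    have hm := PySem.Dict.mem_items_of_get?_eq_some pvChains h
    simp only [pvChains, List.mem_cons, List.not_mem_nil, or_false,
      Prod.mk.injEq] at hm
    rcases hm with ⟨_,rfl⟩|⟨_,rfl⟩|⟨_,rfl⟩|⟨_,rfl⟩|⟨_,rfl⟩|⟨_,rfl⟩|⟨_,rfl⟩|⟨_,rfl⟩|⟨_,rfl⟩|⟨_,rfl⟩|⟨_,rfl⟩|⟨_,rfl⟩|⟨_,rfl⟩ <;>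
      simp only [List.mem_cons, List.not_mem_nil, or_false] at hx <;>
      rcases hx with rfl|rfl <;> decide

-- a non-key looks up to the empty chain
theorem pvNotKey (cur : String) (h : cur ∉ pvKeys) : PySem.Dict.getD pvChains cur [] = [] := by
  rw [PySem.Dict.getD_eq_get?_getD]
  rw [(PySem.Dict.get?_eq_none_iff_not_mem_keys pvChains cur).mpr (by simpa [pvChains, pvKeys] using h)]
  rfl

theorem pvAInner_nf (a : String) (chain : List String) (h : ∀ x ∈ chain, x ≠ a) :
    ∀ cur parent queue, (pvAInner chain cur a parent queue).2.2 = false := by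
  induction chain with
  | nil => intro cur parent queue; rfl
  | cons fb rest ih =>
    intro cur parent queue
    have hfb : (fb == a) = false := beq_eq_false_iff_ne.mpr (h fb (by simp))
    have hrest : ∀ x ∈ rest, x ≠ a := fun x hx => h x (by simp [hx])
    simp only [pvAInner]
    split_ifs with h1 h2
    · exact ih hrest _ _ _
    · exact absurd h2 (by simp [hfb])
    · exact ih hrest _ _ _

theorem pvALoop_nf (a : String) (ha : a ∉ pvVals) :
    ∀ fuel queue parent, (pvALoop fuel queue parent a).2 = false := by
  intro fuel
  induction fuel with
  | zero => intro queue parent; rfl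
  | succ n ih =>
    intro queue parent
    cases queue with
    | nil => rfl
    | cons cur rest =>
      have hchain : ∀ x ∈ PySem.Dict.getD pvChains cur [], x ≠ a :=
        fun x hx hxa => ha (hxa ▸ pvChain_sub cur x hx)
      simp only [pvALoop, pvAInner_nf a _ hchain, if_false, Bool.false_eq_true]
      exact ih _ _

theorem pvBInner_nf (a : String) (chain : List String) (h : ∀ x ∈ chain, x ≠ a) :
    ∀ path visited queue, (pvBInner chain path a visited queue).1 = none := by
  induction chain with
  | nil => intro path visited queue; rfl
  | cons fb rest ih =>
    intro path visited queue
    have hfb : (fb == a) = false := beq_eq_false_iff_ne.mpr (h fb (by simp))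
    have hrest : ∀ x ∈ rest, x ≠ a := fun x hx => h x (by simp [hx])
    simp only [pvBInner]
    split_ifs with h1 h2
    · exact ih hrest _ _ _
    · exact absurd h2 (by simp [hfb])
    · exact ih hrest _ _ _

theorem pvBLoop_nf (a r : String) (ha : a ∉ pvVals) :
    ∀ fuel queue visited, pvBLoop fuel queue visited r a = [(r, false), (a, true)] := by
  intro fuel
  induction fuel with
  | zero => intro queue visited; rfl
  | succ n ih =>
    intro queue visited
    cases queue with
    | nil => rfl
    | cons hd rest =>
      obtain ⟨node, path⟩ := hd
      have hchain : ∀ x ∈ PySem.Dict.getD pvChains node [], x ≠ a :=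
        fun x hx hxa => ha (hxa ▸ pvChain_sub node x hx)
      have hnone := pvBInner_nf a _ hchain path visited rest
      simp only [pvBLoop]
      rcases hb : pvBInner (PySem.Dict.getD pvChains node []) path a visited rest with ⟨o, v2, q2⟩
      rw [hb] at hnone; simp at hnone; subst hnone
      exact ih _ _

theorem pvCore_eq (r a : String) :
    (let p := pvALoop 32 [r] (PySem.Dict.insert PySem.Dict.empty r none) a
     if p.2 then (pvARecon 32 (some a) p.1 []).map (fun m => (m, m == a))
     else [(r, false), (a, true)])
    = pvBLoop 32 [(r, [r])] (PySem.Set.add PySem.Set.empty r) r a := by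
  by_cases hr : r ∈ pvKeys
  · by_cases ha : a ∈ pvVals
    · simp only [pvKeys, List.mem_cons, List.not_mem_nil, or_false] at hr
      simp only [pvVals, List.mem_cons, List.not_mem_nil, or_false] at ha
      rcases hr with rfl|rfl|rfl|rfl|rfl|rfl|rfl|rfl|rfl|rfl|rfl|rfl|rfl <;>
        (rcases ha with rfl|rfl|rfl|rfl|rfl|rfl|rfl|rfl|rfl|rfl <;> decide)
    · have h1 := pvALoop_nf a ha 32 [r] (PySem.Dict.insert PySem.Dict.empty r none)
      have h2 := pvBLoop_nf a r ha 32 [(r, [r])] (PySem.Set.add PySem.Set.empty r)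
      simp only [h2, h1, Bool.false_eq_true, if_false]
  · have h := pvNotKey r hr
    simp [pvALoop, pvBLoop, pvAInner, pvBInner, h]

-- ===== VERDICT (by name: the statement is the Claim_ definition above) =====
theorem get_routing_path_py_spec : Claim_equal_get_routing_path_py := by
  intro routed actual _
  unfold Spec_get_routing_path_py get_routing_path_py get_routing_path_py_alt
  by_cases h0 : routed = "" ∧ actual = ""
  · simp [h0]
  · simp only [if_neg h0]
    exact pvCore_eq _ _ ▸ rfl
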